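-- pv_equiv track=rewrite | github.com/erikjoplin/sodoku-hints | sodoku.py | convert_to_boxes
-- ===== SOURCE A (Python) =====
-- def convert_to_boxes(p):
--     boxes = list()
--     count = 0
--     box1 = list()
--     box2 = list()
--     box3 = list()
--     for row in p:
--         box1.extend(row[0:3])
--         box2.extend(row[3:6])
--         box3.extend(row[6:10])
--         count += 1
--         if count % 3 == 0:
--             boxes.append(box1)
--             boxes.append(box2)
--             boxes.append(box3)
--             box1 = list()
--             box2 = list()
--             box3 = list()
--     return boxes
-- ===== SOURCE B (Python) =====
-- def convert_to_boxes(p):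
--     boxes = []
--     for g in range(len(p) // 3):
--         r = 3 * g
--         boxes.append(p[r][0:3] + p[r + 1][0:3] + p[r + 2][0:3])
--         boxes.append(p[r][3:6] + p[r + 1][3:6] + p[r + 2][3:6])
--         boxes.append(p[r][6:10] + p[r + 1][6:10] + p[r + 2][6:10])
--     return boxes
-- ===== Notes on version B (the rewrite author's own statement) =====
-- stated objective: alternative
-- what changed: Replaced the streaming three-accumulator/modulo-counter fold with direct block indexing: for each complete band of three rows, the three boxes are built at once by concatenating the corresponding row slices.
import Mathlib
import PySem

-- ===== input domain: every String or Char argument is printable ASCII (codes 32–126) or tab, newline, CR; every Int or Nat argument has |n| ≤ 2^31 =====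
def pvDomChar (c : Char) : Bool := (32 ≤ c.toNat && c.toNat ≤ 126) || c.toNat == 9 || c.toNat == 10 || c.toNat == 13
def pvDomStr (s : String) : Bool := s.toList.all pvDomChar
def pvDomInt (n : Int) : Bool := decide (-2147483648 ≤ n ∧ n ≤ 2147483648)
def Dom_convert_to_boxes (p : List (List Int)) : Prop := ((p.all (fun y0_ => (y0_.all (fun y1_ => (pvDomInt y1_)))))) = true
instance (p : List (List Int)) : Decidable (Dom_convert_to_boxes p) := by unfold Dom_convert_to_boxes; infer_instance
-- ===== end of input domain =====

-- B replaces A's streaming three-accumulator/modulo-counter loop with direct block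
-- indexing over complete row bands (objective: alternative, same cost).

-- ===== PORT A =====
-- state: (boxes, count, box1, box2, box3)
def pvStepA (s : List (List Int) × Int × List Int × List Int × List Int)
    (row : List Int) : List (List Int) × Int × List Int × List Int × List Int :=
  let b1 := s.2.2.1 ++ PySem.List.slice row (some 0) (some 3)
  let b2 := s.2.2.2.1 ++ PySem.List.slice row (some 3) (some 6)
  let b3 := s.2.2.2.2 ++ PySem.List.slice row (some 6) (some 10)
  let c := s.2.1 + 1
  if PySem.Int.mod c 3 = 0 then (s.1 ++ [b1] ++ [b2] ++ [b3], c, [], [], [])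
  else (s.1, c, b1, b2, b3)

def convert_to_boxes (p : List (List Int)) : List (List Int) :=
  (p.foldl pvStepA ([], 0, [], [], [])).1

-- ===== PORT B =====
-- the three boxes of the band starting at row index r (indexing is always in range
-- in Source B, so the getD default is never used for g < length/3)
def pvBand (p : List (List Int)) (g : Nat) : List (List Int) :=
  let r := 3 * g
  let r0 := p.getD r []
  let r1 := p.getD (r + 1) []
  let r2 := p.getD (r + 2) []
  [PySem.List.slice r0 (some 0) (some 3) ++ PySem.List.slice r1 (some 0) (some 3) ++ PySem.List.slice r2 (some 0) (some 3),
   PySem.List.slice r0 (some 3) (some 6) ++ PySem.List.slice r1 (some 3) (some 6) ++ PySem.List.slice r2 (some 3) (some 6),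
   PySem.List.slice r0 (some 6) (some 10) ++ PySem.List.slice r1 (some 6) (some 10) ++ PySem.List.slice r2 (some 6) (some 10)]

def convert_to_boxes_alt (p : List (List Int)) : List (List Int) :=
  (List.range (p.length / 3)).foldl (fun boxes g => boxes ++ pvBand p g) []

-- ===== PRECONDITION & SPEC =====
def Spec_convert_to_boxes (p : List (List Int)) (out : List (List Int)) : Prop := out = convert_to_boxes_alt p
instance (p : List (List Int)) (out : List (List Int)) : Decidable (Spec_convert_to_boxes p out) := by unfold Spec_convert_to_boxes; infer_instance

-- ===== CLAIM (what is proved, stated in full; the proofs are below) =====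
def Claim_equal_convert_to_boxes : Prop := ∀ (p : List (List Int)), Dom_convert_to_boxes p → Spec_convert_to_boxes p (convert_to_boxes p)

-- ===== LEMMAS AND PROOFS =====

theorem pvAlt_flat (p : List (List Int)) :
    convert_to_boxes_alt p = (List.range (p.length / 3)).flatMap (pvBand p) := by
  unfold convert_to_boxes_alt
  exact PySem.List.foldl_append_eq_flatMap (pvBand p) (List.range (p.length / 3)) []

theorem pvBand_cons3 (a b c : List Int) (rest : List (List Int)) (g : Nat) :
    pvBand (a :: b :: c :: rest) (g + 1) = pvBand rest g := by
  unfold pvBand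
  have h : 3 * (g + 1) = (3 * g + 1) + 1 + 1 := by omega
  simp [h]

theorem pvAlt_cons3 (a b c : List Int) (rest : List (List Int)) :
    convert_to_boxes_alt (a :: b :: c :: rest) =
      pvBand (a :: b :: c :: rest) 0 ++ convert_to_boxes_alt rest := by
  rw [pvAlt_flat, pvAlt_flat]
  have hlen : (a :: b :: c :: rest).length / 3 = rest.length / 3 + 1 := by
    simp only [List.length_cons]; omega
  rw [hlen, List.range_succ_eq_map]
  simp only [List.flatMap_cons, List.flatMap_map]
  have hfm : List.flatMap (fun g => pvBand (a :: b :: c :: rest) (Nat.succ g))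
      (List.range (rest.length / 3)) =
      List.flatMap (pvBand rest) (List.range (rest.length / 3)) := by
    apply List.flatMap_congr
    intro g _
    exact pvBand_cons3 a b c rest g
  rw [hfm]

theorem pvAlt_short (p : List (List Int)) (h : p.length < 3) :
    convert_to_boxes_alt p = [] := by
  rw [pvAlt_flat]
  have h0 : p.length / 3 = 0 := by omega
  simp [h0]

theorem pvModNe2 (k : Int) : ¬ (3:Int) ∣ 3 * k + 1 + 1 := by omega

-- the A-fold flushes exactly one band on three rows
theorem pvFoldA3 (a b c : List Int) (rest : List (List Int))
    (boxes : List (List Int)) (k : Int) :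
    List.foldl pvStepA (boxes, 3 * k, [], [], []) (a :: b :: c :: rest) =
      List.foldl pvStepA
        (boxes ++ pvBand (a :: b :: c :: rest) 0, 3 * (k + 1), [], [], []) rest := by
  have ec : 3 * k + 1 + 1 + 1 = 3 * (k + 1) := by ring
  simp only [List.foldl_cons]
  have e1 : pvStepA (boxes, 3 * k, [], [], []) a =
      (boxes, 3 * k + 1,
        PySem.List.slice a none (some 3),
        PySem.List.slice a (some 3) (some 6),
        PySem.List.slice a (some 6) (some 10)) := by
    simp [pvStepA]
  rw [e1]
  have e2 : pvStepA (boxes, 3 * k + 1,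
      PySem.List.slice a none (some 3),
      PySem.List.slice a (some 3) (some 6),
      PySem.List.slice a (some 6) (some 10)) b =
      (boxes, 3 * k + 1 + 1,
        PySem.List.slice a none (some 3) ++ PySem.List.slice b none (some 3),
        PySem.List.slice a (some 3) (some 6) ++ PySem.List.slice b (some 3) (some 6),
        PySem.List.slice a (some 6) (some 10) ++ PySem.List.slice b (some 6) (some 10)) := by
    simp [pvStepA, pvModNe2 k]
  rw [e2]
  have e3 : pvStepA (boxes, 3 * k + 1 + 1,
      PySem.List.slice a none (some 3) ++ PySem.List.slice b none (some 3),
      PySem.List.slice a (some 3) (some 6) ++ PySem.List.slice b (some 3) (some 6),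
      PySem.List.slice a (some 6) (some 10) ++ PySem.List.slice b (some 6) (some 10)) c =
      (boxes ++ pvBand (a :: b :: c :: rest) 0, 3 * (k + 1), [], [], []) := by
    simp [pvStepA, pvBand, ec]
  rw [e3]

theorem pvFoldA_main : ∀ (n : Nat) (p : List (List Int)), p.length ≤ n →
    ∀ (boxes : List (List Int)) (k : Int),
    (List.foldl pvStepA (boxes, 3 * k, [], [], []) p).1 = boxes ++ convert_to_boxes_alt p := by
  intro n
  induction n with
  | zero =>
    intro p hp boxes k
    have hnil : p = [] := by cases p <;> simp_all
    subst hnil; simp [pvAlt_short]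
  | succ n ih =>
    intro p hp boxes k
    match p with
    | [] => simp [pvAlt_short]
    | [a] =>
      simp [pvStepA, pvAlt_short]
    | [a, b] =>
      simp [pvStepA, pvModNe2 k, pvAlt_short]
    | a :: b :: c :: rest =>
      rw [pvFoldA3]
      have hr : rest.length ≤ n := by simp only [List.length_cons] at hp; omega
      rw [ih rest hr _ (k + 1), pvAlt_cons3]
      simp

-- ===== VERDICT (by name: the statement is the Claim_ definition above) =====
theorem convert_to_boxes_spec : Claim_equal_convert_to_boxes := by
  intro p _
  unfold Spec_convert_to_boxes convert_to_boxes
  have := pvFoldA_main p.length p (le_refl _) [] 0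
  simpa using this
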